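-- pv_equiv track=rewrite | github.com/dkettchen/gender_census_2024_data | src/sort_femme_and_masc.py | is_femme
-- ===== SOURCE A (Python) =====
-- def is_femme(input_str:str):
--     """
--     takes a string
--
--     returns True if it denotes an alignment with femininity
--
--     otherwise returns False
--     """
--
--     # making case insensitive
--     lower_str = input_str.lower()
--
--     result_bool = True
--
--     # excluding stuff
--     for item in [
--         "masc",
--         "andro",
--         "utch",
--         "tomboy",
--         "femininity is something deeply performative for me", # implies non-enjoyment of it
--         "angry at societal expectations of femininity",
--         "macho",
--         "never quite doing femininity right",
--         "nonfem",
--         "not fem",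
--         "non-fem",
--         "unfem",
--         "femoid",
--         "post-",
--         "rosazur",
--         "trans fem / transfem",
--         "transfem (short but cute for transfeminine)",
--         "would be cuter if i wasn't so lazy",
--     ]:
--         if item in lower_str:
--             result_bool = False
--
--     # reincluding transmascs
--     for item in [
--         "trans masc",
--         "transmasc",
--         "trans-masc",
--     ]:
--         if item in lower_str:
--             result_bool = True
--
--     # remove non-qualifying transmasc mentions
--     for item in [
--         "transmascfem",
--         "transmascfemme",
--     ]:
--         if item in lower_str:
--             result_bool = False
--
--     return result_bool
-- ===== SOURCE B (Python) =====
-- # B: unified priority-tagged rule table; result = verdict of the highest-priority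
-- # matching rule (default priority 0 -> True), instead of A's three flag-override loops.
-- # Correct because A's later loops override earlier ones: its answer is exactly the
-- # verdict of the highest-priority list containing a match (fem-transmasc=3 -> False,
-- # transmasc=2 -> True, exclude=1 -> False, nothing=0 -> True).
--
-- _RULES = (
--     [(1, t) for t in [
--         "masc",
--         "andro",
--         "utch",
--         "tomboy",
--         "femininity is something deeply performative for me",
--         "angry at societal expectations of femininity",
--         "macho",
--         "never quite doing femininity right",
--         "nonfem",
--         "not fem",
--         "non-fem",
--         "unfem",
--         "femoid",
--         "post-",
--         "rosazur",
--         "trans fem / transfem",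
--         "transfem (short but cute for transfeminine)",
--         "would be cuter if i wasn't so lazy",
--     ]]
--     + [(2, t) for t in ["trans masc", "transmasc", "trans-masc"]]
--     + [(3, t) for t in ["transmascfem", "transmascfemme"]]
-- )
--
-- _VERDICT = (True, False, True, False)  # indexed by priority
--
--
-- def is_femme(input_str: str):
--     lower_str = input_str.lower()
--     best = max((pri for pri, term in _RULES if term in lower_str), default=0)
--     return _VERDICT[best]
-- ===== Notes on version B (the rewrite author's own statement) =====
-- stated objective: alternative
-- what changed: Replaced A's three sequential flag-override loops with a single priority-tagged rule table: compute the maximum priority among matching substrings (default 0) and look the answer up in a verdict table, so no mutable boolean is overridden.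
import Mathlib
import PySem

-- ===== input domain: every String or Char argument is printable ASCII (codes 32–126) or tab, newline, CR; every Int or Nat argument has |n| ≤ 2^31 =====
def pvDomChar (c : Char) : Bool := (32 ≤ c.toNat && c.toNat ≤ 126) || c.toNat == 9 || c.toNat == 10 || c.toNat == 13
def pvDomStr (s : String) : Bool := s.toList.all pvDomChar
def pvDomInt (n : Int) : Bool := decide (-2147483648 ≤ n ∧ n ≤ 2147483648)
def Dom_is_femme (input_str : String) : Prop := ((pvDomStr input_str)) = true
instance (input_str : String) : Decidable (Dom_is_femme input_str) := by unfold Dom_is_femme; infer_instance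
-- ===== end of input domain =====

-- B replaces A's three flag-override loops with one priority-tagged rule table:
-- the answer is the verdict of the highest matching priority (alternative decomposition, same cost).

-- shared literal substring lists (verbatim from the Python source)
def excludeList : List String := [
  "masc",
  "andro",
  "utch",
  "tomboy",
  "femininity is something deeply performative for me",
  "angry at societal expectations of femininity",
  "macho",
  "never quite doing femininity right",
  "nonfem",
  "not fem",
  "non-fem",
  "unfem",
  "femoid",
  "post-",
  "rosazur",
  "trans fem / transfem",
  "transfem (short but cute for transfeminine)",
  "would be cuter if i wasn't so lazy"]

def transmascList : List String := ["trans masc", "transmasc", "trans-masc"]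

def transmascfemList : List String := ["transmascfem", "transmascfemme"]

-- ===== PORT A =====
-- three sequential loops over a mutable boolean, exactly as in the Python
def is_femme (input_str : String) : Bool :=
  let lower_str := PySem.Str.lower input_str
  let result_bool := true
  let result_bool := excludeList.foldl
    (fun acc item => if PySem.Str.isIn item lower_str then false else acc) result_bool
  let result_bool := transmascList.foldl
    (fun acc item => if PySem.Str.isIn item lower_str then true else acc) result_bool
  let result_bool := transmascfemList.foldl
    (fun acc item => if PySem.Str.isIn item lower_str then false else acc) result_bool
  result_bool

-- ===== PORT B =====
-- Source B's _RULES: priority-tagged concatenation of the three lists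
def rulesList : List (Nat × String) :=
  excludeList.map (fun t => (1, t))
    ++ transmascList.map (fun t => (2, t))
    ++ transmascfemList.map (fun t => (3, t))

def is_femme_alt (input_str : String) : Bool :=
  let lower_str := PySem.Str.lower input_str
  -- max((pri for pri, term in _RULES if term in lower_str), default=0)
  let best := (((rulesList.filter (fun pt => PySem.Str.isIn pt.2 lower_str)).map Prod.fst).foldl
    Nat.max 0)
  -- _VERDICT[best]; best ∈ {0,1,2,3} since priorities are 1..3
  match best with
  | 0 => true
  | 1 => false
  | 2 => true
  | _ => false

-- ===== PRECONDITION & SPEC =====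
def Spec_is_femme (input_str : String) (out : Bool) : Prop := out = is_femme_alt input_str
instance (input_str : String) (out : Bool) : Decidable (Spec_is_femme input_str out) := by unfold Spec_is_femme; infer_instance

-- ===== CLAIM =====
def Claim_equal_is_femme : Prop := ∀ (input_str : String), Dom_is_femme input_str → Spec_is_femme input_str (is_femme input_str)

-- ===== LEMMAS AND PROOFS =====

-- A loop that overwrites the accumulator with `false` on a match computes `b && !any`
theorem foldl_override_false (l : List String) (s : String) (b : Bool) :
    l.foldl (fun acc item => if PySem.Str.isIn item s then false else acc) b
      = (b && !(l.any (fun t => PySem.Str.isIn t s))) := by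
  induction l generalizing b with
  | nil => simp
  | cons x xs ih =>
      simp only [List.foldl_cons, List.any_cons]
      cases PySem.Str.isIn x s
      · rw [if_neg Bool.false_ne_true, ih]; simp
      · rw [if_pos rfl, ih]; simp

-- A loop that overwrites the accumulator with `true` on a match computes `b || any`
theorem foldl_override_true (l : List String) (s : String) (b : Bool) :
    l.foldl (fun acc item => if PySem.Str.isIn item s then true else acc) b
      = (b || l.any (fun t => PySem.Str.isIn t s)) := by
  induction l generalizing b with
  | nil => simp
  | cons x xs ih =>
      simp only [List.foldl_cons, List.any_cons]
      cases PySem.Str.isIn x s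
      · rw [if_neg Bool.false_ne_true, ih]; simp
      · rw [if_pos rfl, ih]; simp

-- Max over the matched priorities of one constant-priority segment
theorem foldl_max_segment (l : List String) (c : Nat) (s : String) (m : Nat) :
    ((((l.map (fun t => (c, t))).filter (fun pt => PySem.Str.isIn pt.2 s)).map Prod.fst).foldl
        Nat.max m)
      = if l.any (fun t => PySem.Str.isIn t s) then Nat.max m c else m := by
  induction l generalizing m with
  | nil => simp
  | cons x xs ih =>
      simp only [List.map_cons, List.filter_cons, List.any_cons]
      rcases Bool.eq_false_or_eq_true (PySem.Str.isIn x s) with h | h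
      · simp only [h, reduceIte, Bool.true_or, List.map_cons, List.foldl_cons, ih]
        split <;> simp
      · simp only [h, Bool.false_or]
        rw [if_neg (by simp)]
        exact ih m

-- ===== VERDICT =====
theorem is_femme_spec : Claim_equal_is_femme := by
  intro input_str _
  unfold Spec_is_femme is_femme is_femme_alt rulesList
  simp only [foldl_override_false, foldl_override_true,
    List.filter_append, List.map_append, List.foldl_append, foldl_max_segment]
  cases hF : transmascfemList.any (fun t => PySem.Str.isIn t (PySem.Str.lower input_str)) <;>
  cases hM : transmascList.any (fun t => PySem.Str.isIn t (PySem.Str.lower input_str)) <;>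
  cases hE : excludeList.any (fun t => PySem.Str.isIn t (PySem.Str.lower input_str)) <;>
  simp
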